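-- pv_equiv track=rewrite | github.com/appleweiping/Pony-Rec | main_export_llm2rec_same_candidate_task.py | _item_catalog_from_rows
-- ===== SOURCE A (Python) =====
-- from typing import Any
--
-- def _text(value: Any) -> str:
--     if value is None:
--         return ""
--     return str(value).strip()
--
-- def _item_catalog_from_rows(rows: list[dict[str, str]]) -> dict[str, dict[str, str]]:
--     catalog: dict[str, dict[str, str]] = {}
--     for row in rows:
--         item_id = _text(row.get("item_id"))
--         if not item_id:
--             continue
--         current = catalog.setdefault(item_id, {"candidate_title": "", "candidate_text": ""})
--         title = _text(row.get("candidate_title") or row.get("title"))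
--         text = _text(row.get("candidate_text") or row.get("embedding_text"))
--         if title and not current["candidate_title"]:
--             current["candidate_title"] = title
--         if text and not current["candidate_text"]:
--             current["candidate_text"] = text
--     return catalog
-- ===== SOURCE B (Python) =====
-- def _text(value) -> str:
--     if value is None:
--         return ""
--     return str(value).strip()
--
--
-- def _first_nonempty(vals) -> str:
--     return next((v for v in vals if v), "")
--
--
-- def _item_catalog_from_rows(rows: list[dict[str, str]]) -> dict[str, dict[str, str]]:
--     # Group rows by item_id (first-appearance order), then pick the first
--     # non-empty stripped title/text per group.
--     groups: dict[str, list[dict[str, str]]] = {}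
--     for row in rows:
--         item_id = _text(row.get("item_id"))
--         if item_id:
--             groups.setdefault(item_id, []).append(row)
--     return {
--         item_id: {
--             "candidate_title": _first_nonempty(
--                 _text(r.get("candidate_title") or r.get("title")) for r in rs
--             ),
--             "candidate_text": _first_nonempty(
--                 _text(r.get("candidate_text") or r.get("embedding_text")) for r in rs
--             ),
--         }
--         for item_id, rs in groups.items()
--     }
-- ===== Notes on version B (the rewrite author's own statement) =====
-- stated objective: alternative
-- what changed: B first groups the rows by non-empty item_id (insertion order preserved) and then, per group, selects the first non-empty stripped title/text in a dict comprehension, replacing A's incremental set-if-still-empty updates of a running catalog.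
import Mathlib
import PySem

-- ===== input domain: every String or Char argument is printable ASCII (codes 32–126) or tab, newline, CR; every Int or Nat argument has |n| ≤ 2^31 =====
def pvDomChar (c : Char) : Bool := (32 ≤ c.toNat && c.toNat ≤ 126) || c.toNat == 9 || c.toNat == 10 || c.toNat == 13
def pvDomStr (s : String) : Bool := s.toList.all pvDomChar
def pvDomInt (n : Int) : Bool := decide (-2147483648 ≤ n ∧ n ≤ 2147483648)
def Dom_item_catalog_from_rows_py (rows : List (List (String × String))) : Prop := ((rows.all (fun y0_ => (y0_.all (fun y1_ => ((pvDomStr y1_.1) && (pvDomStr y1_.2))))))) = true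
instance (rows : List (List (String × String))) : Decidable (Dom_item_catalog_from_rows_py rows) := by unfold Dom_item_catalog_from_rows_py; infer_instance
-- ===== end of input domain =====

-- B regroups the rows by item_id first and then selects the first non-empty title/text per group,
-- instead of A's incremental update-if-still-empty loop (objective: alternative decomposition, same cost).

-- shared module helper: _text(value) (values here are always str-or-missing)
def pvText (o : Option String) : String :=
  match o with
  | none => ""
  | some s => PySem.Str.strip s

-- row.get(k) on a Python dict row
def pvRGet (row : List (String × String)) (k : String) : Option String :=
  (PySem.Dict.mk row).get? k

-- Python `a or b` on two .get results (None and "" are falsy)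
def pvOr (a b : Option String) : Option String :=
  match a with
  | none => b
  | some s => if s = "" then b else some s

-- ===== PORT A =====
def pvStepA (catalog : PySem.Dict String (PySem.Dict String String))
    (row : List (String × String)) : PySem.Dict String (PySem.Dict String String) :=
  let item_id := pvText (pvRGet row "item_id")
  if item_id = "" then catalog
  else
    let dflt := PySem.Dict.ofList [("candidate_title", ""), ("candidate_text", "")]
    let catalog := catalog.setdefault item_id dflt
    let current := (catalog.get? item_id).getD dflt
    let title := pvText (pvOr (pvRGet row "candidate_title") (pvRGet row "title"))
    let txt := pvText (pvOr (pvRGet row "candidate_text") (pvRGet row "embedding_text"))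
    let current := if title ≠ "" ∧ current.getD "candidate_title" "" = "" then
        current.insert "candidate_title" title else current
    let current := if txt ≠ "" ∧ current.getD "candidate_text" "" = "" then
        current.insert "candidate_text" txt else current
    catalog.insert item_id current

def item_catalog_from_rows_py (rows : List (List (String × String))) : List (String × List (String × String)) :=
  ((rows.foldl pvStepA PySem.Dict.empty).items).map (fun p => (p.1, p.2.items))

-- ===== PORT B =====
def pvFirstNonempty (vals : List String) : String :=
  (vals.find? (fun v => v ≠ "")).getD ""

def pvStepB (g : PySem.Dict String (List (List (String × String))))
    (row : List (String × String)) : PySem.Dict String (List (List (String × String))) :=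
  let item_id := pvText (pvRGet row "item_id")
  if item_id = "" then g else g.modify item_id [] (· ++ [row])

def item_catalog_from_rows_py_alt (rows : List (List (String × String))) : List (String × List (String × String)) :=
  let groups := rows.foldl pvStepB PySem.Dict.empty
  groups.items.map (fun p =>
    (p.1,
     [("candidate_title", pvFirstNonempty (p.2.map (fun r => pvText (pvOr (pvRGet r "candidate_title") (pvRGet r "title"))))),
      ("candidate_text", pvFirstNonempty (p.2.map (fun r => pvText (pvOr (pvRGet r "candidate_text") (pvRGet r "embedding_text")))))]))

-- ===== PRECONDITION & SPEC =====
def Spec_item_catalog_from_rows_py (rows : List (List (String × String))) (out : List (String × List (String × String))) : Prop := out = item_catalog_from_rows_py_alt rows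
instance (rows : List (List (String × String))) (out : List (String × List (String × String))) : Decidable (Spec_item_catalog_from_rows_py rows out) := by unfold Spec_item_catalog_from_rows_py; infer_instance

-- ===== CLAIM (what is proved, stated in full; the proofs are below) =====
def Claim_equal_item_catalog_from_rows_py : Prop := ∀ (rows : List (List (String × String))), Dom_item_catalog_from_rows_py rows → Spec_item_catalog_from_rows_py rows (item_catalog_from_rows_py rows)

-- ===== LEMMAS AND PROOFS =====

def pvRowTitle (r : List (String × String)) : String :=
  pvText (pvOr (pvRGet r "candidate_title") (pvRGet r "title"))

def pvRowText (r : List (String × String)) : String :=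
  pvText (pvOr (pvRGet r "candidate_text") (pvRGet r "embedding_text"))

-- the inner dict A maintains for a group equals this function of the group's rows
def pvInner (rs : List (List (String × String))) : PySem.Dict String String :=
  PySem.Dict.mk [("candidate_title", pvFirstNonempty (rs.map pvRowTitle)),
                 ("candidate_text", pvFirstNonempty (rs.map pvRowText))]

def pvRender (g : PySem.Dict String (List (List (String × String)))) :
    PySem.Dict String (PySem.Dict String String) :=
  PySem.Dict.mk (g.items.map (fun p => (p.1, pvInner p.2)))

lemma pvFirstNonempty_append_singleton (l : List String) (x : String) :
    pvFirstNonempty (l ++ [x]) =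
      if pvFirstNonempty l = "" then x else pvFirstNonempty l := by
  unfold pvFirstNonempty
  rw [List.find?_append]
  cases h : l.find? (fun v => v ≠ "") with
  | none =>
      by_cases hx : x = "" <;> simp [List.find?, hx]
  | some v =>
      have hv := List.find?_some h
      simp at hv
      simp [hv]

lemma pvInner_getD_title (a b : String) :
    (PySem.Dict.mk [("candidate_title", a), ("candidate_text", b)]).getD "candidate_title" "" = a := rfl

lemma pvInner_getD_text (a b : String) :
    (PySem.Dict.mk [("candidate_title", a), ("candidate_text", b)]).getD "candidate_text" "" = b := rfl

lemma pvInner_insert_title (a b t : String) :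
    (PySem.Dict.mk [("candidate_title", a), ("candidate_text", b)]).insert "candidate_title" t
      = PySem.Dict.mk [("candidate_title", t), ("candidate_text", b)] := rfl

lemma pvInner_insert_text (a b x : String) :
    (PySem.Dict.mk [("candidate_title", a), ("candidate_text", b)]).insert "candidate_text" x
      = PySem.Dict.mk [("candidate_title", a), ("candidate_text", x)] := rfl

lemma pvInner_step (rs : List (List (String × String))) (row : List (String × String)) :
    (let current := pvInner rs;
     let current := if pvRowTitle row ≠ "" ∧ current.getD "candidate_title" "" = "" then
         current.insert "candidate_title" (pvRowTitle row) else current;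
     if pvRowText row ≠ "" ∧ current.getD "candidate_text" "" = "" then
         current.insert "candidate_text" (pvRowText row) else current)
    = pvInner (rs ++ [row]) := by
  show (let current := PySem.Dict.mk [("candidate_title", pvFirstNonempty (rs.map pvRowTitle)),
            ("candidate_text", pvFirstNonempty (rs.map pvRowText))];
     let current := if pvRowTitle row ≠ "" ∧ current.getD "candidate_title" "" = "" then
         current.insert "candidate_title" (pvRowTitle row) else current;
     if pvRowText row ≠ "" ∧ current.getD "candidate_text" "" = "" then
         current.insert "candidate_text" (pvRowText row) else current)
    = pvInner (rs ++ [row])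
  unfold pvInner
  rw [List.map_append, List.map_append, List.map_singleton, List.map_singleton,
      pvFirstNonempty_append_singleton, pvFirstNonempty_append_singleton]
  set a := pvFirstNonempty (rs.map pvRowTitle) with ha
  set b := pvFirstNonempty (rs.map pvRowText) with hb
  by_cases h1 : a = "" <;> by_cases h2 : b = "" <;>
    by_cases h3 : pvRowTitle row = "" <;> by_cases h4 : pvRowText row = "" <;>
      simp [h1, h2, h3, h4, pvInner_getD_title, pvInner_getD_text,
            pvInner_insert_title, pvInner_insert_text]

lemma pvRender_get? (g : PySem.Dict String (List (List (String × String)))) (k : String) :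
    (pvRender g).get? k = (g.get? k).map pvInner := by
  unfold pvRender PySem.Dict.get?
  rw [List.find?_map]
  simp only [Function.comp_def]
  cases List.find? (fun p => p.1 == k) g.items <;> rfl

lemma pvRender_contains (g : PySem.Dict String (List (List (String × String)))) (k : String) :
    (pvRender g).contains k = g.contains k := by
  rw [PySem.Dict.contains_eq_isSome_get?, PySem.Dict.contains_eq_isSome_get?, pvRender_get?]
  cases g.get? k <;> rfl

lemma pvRender_insert (g : PySem.Dict String (List (List (String × String)))) (k : String)
    (rs : List (List (String × String))) :
    pvRender (g.insert k rs) = (pvRender g).insert k (pvInner rs) := by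
  apply PySem.Dict.ext
  show ((g.insert k rs).items.map (fun p => (p.1, pvInner p.2)))
      = ((pvRender g).insert k (pvInner rs)).items
  rw [PySem.Dict.items_insert, PySem.Dict.items_insert, pvRender_contains]
  by_cases h : g.contains k = true
  · simp only [h, if_pos]
    show _ = List.map _ (pvRender g).items
    unfold pvRender
    simp only [List.map_map]
    apply List.map_congr_left
    intro p _
    by_cases hp : p.1 = k <;> simp [hp]
  · simp only [h, if_neg, Bool.false_eq_true, not_false_iff]
    show _ = (pvRender g).items ++ [(k, pvInner rs)]
    unfold pvRender
    simp

lemma pvSetdefault_insert {nu : Type} (d : PySem.Dict String nu) (k : String) (v w : nu) :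
    (d.setdefault k v).insert k w = d.insert k w := by
  by_cases h : d.contains k = true
  · rw [PySem.Dict.setdefault_of_contains d v h]
  · rw [PySem.Dict.setdefault_of_not_contains d v (by simpa using h),
        PySem.Dict.insert_insert_self]

lemma pvStep_commute (g : PySem.Dict String (List (List (String × String))))
    (row : List (String × String)) :
    pvStepA (pvRender g) row = pvRender (pvStepB g row) := by
  unfold pvStepA pvStepB
  by_cases hid : pvText (pvRGet row "item_id") = ""
  · simp [hid]
  · simp only [hid, if_neg, not_false_iff]
    have hdflt : (PySem.Dict.ofList [("candidate_title", ""), ("candidate_text", "")]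
        : PySem.Dict String String) = pvInner [] := rfl
    set id := pvText (pvRGet row "item_id")
    have hmod : PySem.Dict.modify g id [] (fun l => l ++ [row])
        = g.insert id (g.getD id [] ++ [row]) := rfl
    rw [hmod, pvRender_insert]
    have hcur : (((pvRender g).setdefault id
          (PySem.Dict.ofList [("candidate_title", ""), ("candidate_text", "")])).get? id).getD
          (PySem.Dict.ofList [("candidate_title", ""), ("candidate_text", "")])
        = pvInner (g.getD id []) := by
      rw [PySem.Dict.get?_setdefault_self, pvRender_get?, hdflt,
          PySem.Dict.getD_eq_get?_getD]
      cases g.get? id <;> rfl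
    rw [hcur, pvSetdefault_insert]
    congr 1
    exact pvInner_step (g.getD id []) row

lemma pvFold_commute (rows : List (List (String × String)))
    (g : PySem.Dict String (List (List (String × String)))) :
    rows.foldl pvStepA (pvRender g) = pvRender (rows.foldl pvStepB g) := by
  induction rows generalizing g with
  | nil => rfl
  | cons r t ih => rw [List.foldl_cons, List.foldl_cons, pvStep_commute, ih]

-- ===== VERDICT (by name: the statement is the Claim_ definition above) =====
theorem item_catalog_from_rows_py_spec : Claim_equal_item_catalog_from_rows_py := by
  intro rows _
  unfold Spec_item_catalog_from_rows_py item_catalog_from_rows_py item_catalog_from_rows_py_alt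
  have h0 : (PySem.Dict.empty : PySem.Dict String (PySem.Dict String String)) = pvRender PySem.Dict.empty := rfl
  rw [h0, pvFold_commute]
  simp only [pvRender, List.map_map]
  rfl
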